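-- pv_equiv track=rewrite | github.com/sheffieldnlp/cwi | src/features/NGram_char_features.py | getPrefixesAndSuffixes
-- ===== SOURCE A (Python) =====
-- from collections import Counter
--
-- def normalizeWord(word):
--     result = word.lower()
--     return result
--
-- def getPrefixesAndSuffixes(target, min_length, max_length):
--     prefix_counts = Counter()
--     suffix_counts = Counter()
--     tokens = target.split(' ')
--     num_tokens = len(tokens)
--     if num_tokens == 1:
--         word = normalizeWord(tokens[0])
--
--         prefixes = []
--         suffixes = []
--         for j in range(min_length, max_length + 1):
--             prefix = word[:j]
--             suffix = word[-j:]
--             prefixes.append(prefix)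
--             suffixes.append(suffix)
--         prefix_counts.update(prefixes)
--         suffix_counts.update(suffixes)
--     else:
--         for token in tokens:
--             prefixes, suffixes = getPrefixesAndSuffixes(token, min_length, max_length)
--             prefix_counts.update(prefixes)
--             suffix_counts.update(suffixes)
--
--     return prefix_counts, suffix_counts
-- ===== SOURCE B (Python) =====
-- from collections import Counter
--
-- def getPrefixesAndSuffixes(target, min_length, max_length):
--     prefix_counts = Counter()
--     suffix_counts = Counter()
--     for token in target.split(' '):
--         word = token.lower()
--         for j in range(min_length, max_length + 1):
--             prefix_counts[word[:j]] += 1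
--             suffix_counts[word[-j:]] += 1
--     return prefix_counts, suffix_counts
-- ===== Notes on version B (the rewrite author's own statement) =====
-- stated objective: simpler
-- what changed: Replaces the one-level self-recursion (recursing on each token, with a num_tokens==1 base branch building intermediate prefix/suffix lists and merging per-token Counters) by a single flat double loop that increments the two Counters directly per token and length.
import Mathlib
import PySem

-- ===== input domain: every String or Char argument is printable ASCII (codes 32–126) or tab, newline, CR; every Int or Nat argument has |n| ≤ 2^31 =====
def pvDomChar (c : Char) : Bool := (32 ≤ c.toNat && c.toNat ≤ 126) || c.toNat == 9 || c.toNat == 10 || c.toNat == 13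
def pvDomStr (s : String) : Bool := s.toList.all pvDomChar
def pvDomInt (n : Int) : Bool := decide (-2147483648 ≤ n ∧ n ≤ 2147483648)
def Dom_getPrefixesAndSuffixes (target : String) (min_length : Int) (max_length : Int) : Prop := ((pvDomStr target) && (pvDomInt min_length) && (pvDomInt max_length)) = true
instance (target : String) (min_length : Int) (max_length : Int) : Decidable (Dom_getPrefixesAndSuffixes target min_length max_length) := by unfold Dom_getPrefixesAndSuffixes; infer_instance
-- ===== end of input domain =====

-- B replaces A's one-level self-recursion and its num_tokens==1 special branch by one flat
-- double loop over tokens and lengths that increments the two Counters directly (objective: simpler).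

-- ===== PORT A =====
-- pvMsp c l = l.split(c) for a single separator character, as a plain structural recursion;
-- it is used only to prove termination of the port's well-founded recursion (pvToken_lt below).
def pvMsp (c : Char) : List Char → List (List Char)
  | [] => [[]]
  | a :: l =>
    if a = c then [] :: pvMsp c l
    else
      match pvMsp c l with
      | t :: ts => (a :: t) :: ts
      | [] => [[a]]

theorem pvMsp_ne_nil (c : Char) (l : List Char) : pvMsp c l ≠ [] := by
  induction l with
  | nil => simp [pvMsp]
  | cons a l ih =>
    simp only [pvMsp]
    split
    · simp
    · split
      · simp
      · simp

-- go_spec: PySem.Chars.splitOn.go for a single-char separator, with enough fuel,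
-- computes acc.reverse ++ (cur.reverse glued onto the head of pvMsp c l).
theorem pvGo_spec (c : Char) :
    ∀ (fuel : Nat) (l cur : List Char) (acc : List (List Char)), l.length < fuel →
      PySem.Chars.splitOn.go [c] fuel l cur acc
        = acc.reverse ++ ((cur.reverse ++ (pvMsp c l).headI) :: (pvMsp c l).tail) := by
  intro fuel
  induction fuel with
  | zero => intro l cur acc h; omega
  | succ f ih =>
    intro l cur acc h
    cases l with
    | nil =>
      simp [PySem.Chars.splitOn.go, pvMsp]
    | cons a rest =>
      simp only [PySem.Chars.splitOn.go]
      by_cases hac : a = c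
      · subst hac
        have hpre : [a].isPrefixOf (a :: rest) = true := by
          simp [List.isPrefixOf]
        rw [if_pos hpre]
        have := ih rest [] (cur.reverse :: acc) (by simpa using Nat.lt_of_succ_lt_succ h)
        simp only [List.length_cons, List.length_nil, List.drop_succ_cons, List.drop_zero]
        rw [this]
        have hne := pvMsp_ne_nil a rest
        cases hmsp : pvMsp a rest with
        | nil => exact absurd hmsp hne
        | cons t ts =>
          simp [pvMsp, hmsp]
      · have hpre : [c].isPrefixOf (a :: rest) = false := by
          simp [List.isPrefixOf]
          exact fun hca => absurd hca.symm hac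
        rw [if_neg (by simp [hpre])]
        have := ih rest (a :: cur) acc (by simpa using Nat.lt_of_succ_lt_succ h)
        rw [this]
        have hne := pvMsp_ne_nil c rest
        cases hmsp : pvMsp c rest with
        | nil => exact absurd hmsp hne
        | cons t ts =>
          simp [pvMsp, hac, hmsp]

theorem pvSplitOn_eq_msp (c : Char) (l : List Char) :
    PySem.Chars.splitOn l [c] = pvMsp c l := by
  have h := pvGo_spec c (l.length + 1) l [] [] (by omega)
  have hne := pvMsp_ne_nil c l
  cases hmsp : pvMsp c l with
  | nil => exact absurd hmsp hne
  | cons t ts =>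
    rw [hmsp] at h
    simpa [PySem.Chars.splitOn] using h

theorem pvMsp_mem_length (c : Char) (l : List Char) :
    ∀ t ∈ pvMsp c l, t.length + (pvMsp c l).length ≤ l.length + 1 := by
  induction l with
  | nil => intro t ht; simp [pvMsp] at ht; simp [ht, pvMsp]
  | cons a l ih =>
    intro t ht
    simp only [pvMsp] at ht ⊢
    by_cases hac : a = c
    · rw [if_pos hac] at ht ⊢
      cases hmsp : pvMsp c l with
      | nil => exact absurd hmsp (pvMsp_ne_nil c l)
      | cons u us =>
        simp only [List.mem_cons] at ht
        rcases ht with rfl | ht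
        · have := ih u (by rw [hmsp]; simp)
          rw [hmsp] at this
          simp only [List.length_cons, List.length_nil] at this ⊢
          omega
        · have := ih t ht
          rw [hmsp] at this
          simp only [List.length_cons] at this ⊢
          omega
    · rw [if_neg hac] at ht ⊢
      cases hmsp : pvMsp c l with
      | nil => exact absurd hmsp (pvMsp_ne_nil c l)
      | cons u us =>
        rw [hmsp] at ht
        replace ht : t ∈ (a :: u) :: us := ht
        show t.length + ((a :: u) :: us).length ≤ (a :: l).length + 1
        simp only [List.mem_cons] at ht
        rcases ht with rfl | ht
        · have := ih u (by rw [hmsp]; simp)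
          rw [hmsp] at this
          simp only [List.length_cons] at this ⊢
          omega
        · have := ih t (by rw [hmsp]; simp [ht])
          rw [hmsp] at this
          simp only [List.length_cons] at this ⊢
          omega

theorem pvToken_lt (s t : List Char) (h2 : (PySem.Chars.splitOn s [' ']).length ≠ 1)
    (ht : t ∈ PySem.Chars.splitOn s [' ']) : t.length < s.length := by
  rw [pvSplitOn_eq_msp] at h2 ht
  have hlen := pvMsp_mem_length ' ' s t ht
  have hne := pvMsp_ne_nil ' ' s
  have hpos : 0 < (pvMsp ' ' s).length := List.length_pos_of_ne_nil hne
  have h2' : 2 ≤ (pvMsp ' ' s).length := by omega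
  omega

-- Counter().update(list_of_keys): one += 1 per element
def pvUpdList (d : PySem.Dict String Int) (L : List String) : PySem.Dict String Int :=
  L.foldl (fun d x => d.modify x 0 (fun v => v + 1)) d

-- Counter.update(other_counter): iterate its items, adding each count
def pvUpdCounter (d : PySem.Dict String Int) (M : List (String × Int)) : PySem.Dict String Int :=
  M.foldl (fun d kv => d.modify kv.1 0 (fun v => v + kv.2)) d

-- recursive body of A on the character list (Counters kept as Dicts; items taken by the wrapper)
def pvGpsA (s : List Char) (min_length max_length : Int) :
    PySem.Dict String Int × PySem.Dict String Int :=
  let tokens := PySem.Chars.splitOn s [' ']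
  if h : tokens.length = 1 then
    let word := PySem.Chars.lower (tokens.headD [])
    let ps := (PySem.List.pyRange min_length (max_length + 1) 1).foldl
      (fun (acc : List String × List String) j =>
        (acc.1 ++ [String.ofList (PySem.List.slice word none (some j))],
         acc.2 ++ [String.ofList (PySem.List.slice word (some (-j)) none)])) ([], [])
    (pvUpdList PySem.Dict.empty ps.1, pvUpdList PySem.Dict.empty ps.2)
  else
    tokens.attach.foldl
      (fun acc t =>
        let r := pvGpsA t.1 min_length max_length
        (pvUpdCounter acc.1 r.1.items, pvUpdCounter acc.2 r.2.items))
      (PySem.Dict.empty, PySem.Dict.empty)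
termination_by s.length
decreasing_by
  exact pvToken_lt s t.1 h t.2

def getPrefixesAndSuffixes (target : String) (min_length : Int) (max_length : Int) : (List (String × Int)) × (List (String × Int)) :=
  let r := pvGpsA target.toList min_length max_length
  (r.1.items, r.2.items)

-- ===== PORT B =====
def pvGpsB (s : List Char) (min_length max_length : Int) :
    PySem.Dict String Int × PySem.Dict String Int :=
  (PySem.Chars.splitOn s [' ']).foldl
    (fun acc tok =>
      let word := PySem.Chars.lower tok
      (PySem.List.pyRange min_length (max_length + 1) 1).foldl
        (fun (acc : PySem.Dict String Int × PySem.Dict String Int) j =>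
          (acc.1.modify (String.ofList (PySem.List.slice word none (some j))) 0 (fun v => v + 1),
           acc.2.modify (String.ofList (PySem.List.slice word (some (-j)) none)) 0 (fun v => v + 1)))
        acc)
    (PySem.Dict.empty, PySem.Dict.empty)

def getPrefixesAndSuffixes_alt (target : String) (min_length : Int) (max_length : Int) : (List (String × Int)) × (List (String × Int)) :=
  let r := pvGpsB target.toList min_length max_length
  (r.1.items, r.2.items)

-- ===== PRECONDITION & SPEC =====
def Spec_getPrefixesAndSuffixes (target : String) (min_length : Int) (max_length : Int) (out : (List (String × Int)) × (List (String × Int))) : Prop := out = getPrefixesAndSuffixes_alt target min_length max_length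
instance (target : String) (min_length : Int) (max_length : Int) (out : (List (String × Int)) × (List (String × Int))) : Decidable (Spec_getPrefixesAndSuffixes target min_length max_length out) := by unfold Spec_getPrefixesAndSuffixes; infer_instance

-- ===== CLAIM (what is proved, stated in full; the proofs are below) =====
def Claim_equal_getPrefixesAndSuffixes : Prop := ∀ (target : String) (min_length : Int) (max_length : Int), Dom_getPrefixesAndSuffixes target min_length max_length → Spec_getPrefixesAndSuffixes target min_length max_length (getPrefixesAndSuffixes target min_length max_length)

-- ===== LEMMAS AND PROOFS =====

theorem pvFoldl_pair {α β γ : Type} (l : List γ) (f : α → γ → α) (g : β → γ → β) (a : α) (b : β) :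
    l.foldl (fun acc x => (f acc.1 x, g acc.2 x)) (a, b) = (l.foldl f a, l.foldl g b) := by
  induction l generalizing a b with
  | nil => rfl
  | cons x l ih => simp [List.foldl_cons, ih]

theorem pvFoldl_append_map {α β : Type} (l : List α) (h : α → β) (init : List β) :
    l.foldl (fun acc x => acc ++ [h x]) init = init ++ l.map h := by
  induction l generalizing init with
  | nil => simp
  | cons x l ih => simp [List.foldl_cons, ih]

theorem pvGetD_updCounter (M : List (String × Int)) (d : PySem.Dict String Int) (v : String) :
    (pvUpdCounter d M).getD v 0
      = d.getD v 0 + ((M.filter (fun kv => kv.1 == v)).map Prod.snd).sum := by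
  induction M generalizing d with
  | nil => simp [pvUpdCounter]
  | cons kv M ih =>
    simp only [pvUpdCounter, List.foldl_cons] at *
    rw [ih]
    rw [PySem.Dict.getD_modify]
    by_cases hv : v = kv.1
    · simp [hv]
      ring
    · have : (kv.1 == v) = false := by simp [Ne.symm hv]
      simp [this, if_neg hv]

theorem pvNodup_filter_eq (v : String) (l : List String) (h : l.Nodup) :
    l.filter (fun x => x == v) = if v ∈ l then [v] else [] := by
  induction l with
  | nil => simp
  | cons x l ih =>
    simp only [List.nodup_cons] at h
    by_cases hx : x = v
    · subst hx
      simp [h.1, ih h.2]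
    · have hb : (x == v) = false := by simp [hx]
      rcases Decidable.em (v ∈ l) with hm | hm
      · simp [hb, ih h.2, hm]
      · simp [hb, ih h.2, hm, Ne.symm hx]

-- merging the Counter of L (via its items) into d = adding 1 per element of L into d
theorem pvUpdCounter_counter (L : List String) (d : PySem.Dict String Int)
    (hd : d.keys.Nodup) : pvUpdCounter d (PySem.Dict.counter L).items = pvUpdList d L := by
  have hitems := PySem.Dict.items_counter L
  -- keys of both sides
  have hkL : (pvUpdCounter d (PySem.Dict.counter L).items).keys
      = PySem.Set.update d.keys (((PySem.Dict.counter L).items).map Prod.fst) := by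
    exact PySem.Dict.keys_foldl_modify_key _ Prod.fst 0 (fun _ kv => fun v => v + kv.2) d
  have hmapfst : ((PySem.Dict.counter L).items).map Prod.fst = PySem.Set.ofList L := by
    rw [hitems, List.map_map]
    show List.map (fun k => k) (PySem.Set.ofList L) = PySem.Set.ofList L
    simp
  have hkR : (pvUpdList d L).keys = PySem.Set.update d.keys L :=
    PySem.Dict.keys_foldl_modify L 0 (fun _ _ => fun v => v + 1) d
  have hkeys : (pvUpdCounter d (PySem.Dict.counter L).items).keys = (pvUpdList d L).keys := by
    rw [hkL, hmapfst, hkR, PySem.Set.update_eq_append_filter, PySem.Set.update_eq_append_filter,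
      PySem.Set.ofList_ofList]
  -- getD agreement at every key
  have hgetD : ∀ v, (pvUpdCounter d (PySem.Dict.counter L).items).getD v 0 = (pvUpdList d L).getD v 0 := by
    intro v
    rw [pvGetD_updCounter, hitems]
    have : (List.map (fun k => (k, (L.count k : Int))) (PySem.Set.ofList L)).filter (fun kv => kv.1 == v)
        = List.map (fun k => (k, (L.count k : Int))) ((PySem.Set.ofList L).filter (fun k => k == v)) := by
      rw [List.filter_map]
      rfl
    rw [this, pvNodup_filter_eq v _ (PySem.Set.nodup_ofList L)]
    have hr : (pvUpdList d L).getD v 0 = d.getD v 0 + (L.count v : Int) :=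
      PySem.Dict.getD_foldl_modify_add_one L d v
    by_cases hv : v ∈ L
    · rw [if_pos ((PySem.Set.mem_ofList L v).mpr hv)]
      simp [hr]
    · rw [if_neg (fun hc => hv ((PySem.Set.mem_ofList L v).mp hc))]
      simp [hr, List.count_eq_zero.mpr hv]
  -- nodup keys on both sides
  have hnL : (pvUpdCounter d (PySem.Dict.counter L).items).keys.Nodup := by
    rw [hkL]
    exact PySem.Set.nodup_update _ _ hd
  have hnR : (pvUpdList d L).keys.Nodup := by
    rw [hkR]
    exact PySem.Set.nodup_update _ _ hd
  apply PySem.Dict.ext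
  rw [PySem.Dict.items_eq_map_keys _ hnL 0, PySem.Dict.items_eq_map_keys _ hnR 0, hkeys]
  exact List.map_congr_left (fun k _ => by rw [hgetD k])

theorem pvFoldl_congr_of_inv {α β : Type} (l : List α) (f g : β → α → β) (init : β)
    (P : β → Prop) (h0 : P init)
    (hf : ∀ acc x, x ∈ l → P acc → f acc x = g acc x)
    (hP : ∀ acc x, x ∈ l → P acc → P (g acc x)) :
    l.foldl f init = l.foldl g init := by
  induction l generalizing init with
  | nil => rfl
  | cons x l ih =>
    simp only [List.foldl_cons]
    rw [hf init x (by simp) h0]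
    exact ih (g init x) (hP init x (by simp) h0)
      (fun acc y hy => hf acc y (by simp [hy]))
      (fun acc y hy => hP acc y (by simp [hy]))

-- the prefix/suffix key of word for length j
def pvPf (word : List Char) (j : Int) : String := String.ofList (PySem.List.slice word none (some j))
def pvSf (word : List Char) (j : Int) : String := String.ofList (PySem.List.slice word (some (-j)) none)

-- B's per-token inner loop, as a pair of dict folds
theorem pvInner_eq (word : List Char) (mn mx : Int) (d : PySem.Dict String Int × PySem.Dict String Int) :
    (PySem.List.pyRange mn (mx + 1) 1).foldl
        (fun (acc : PySem.Dict String Int × PySem.Dict String Int) j =>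
          (acc.1.modify (String.ofList (PySem.List.slice word none (some j))) 0 (fun v => v + 1),
           acc.2.modify (String.ofList (PySem.List.slice word (some (-j)) none)) 0 (fun v => v + 1)))
        d
      = (pvUpdList d.1 ((PySem.List.pyRange mn (mx + 1) 1).map (pvPf word)),
         pvUpdList d.2 ((PySem.List.pyRange mn (mx + 1) 1).map (pvSf word))) := by
  obtain ⟨d1, d2⟩ := d
  have h1 := pvFoldl_pair (PySem.List.pyRange mn (mx + 1) 1)
    (fun d j => d.modify (String.ofList (PySem.List.slice word none (some j))) 0 (fun v => v + 1))
    (fun d j => d.modify (String.ofList (PySem.List.slice word (some (-j)) none)) 0 (fun v => v + 1))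
    d1 d2
  refine h1.trans ?_
  unfold pvUpdList
  rw [List.foldl_map, List.foldl_map]
  simp only [pvPf, pvSf]

-- A's base-case list building yields exactly the mapped prefix/suffix lists
theorem pvLists_eq (word : List Char) (mn mx : Int) :
    (PySem.List.pyRange mn (mx + 1) 1).foldl
        (fun (acc : List String × List String) j =>
          (acc.1 ++ [String.ofList (PySem.List.slice word none (some j))],
           acc.2 ++ [String.ofList (PySem.List.slice word (some (-j)) none)])) ([], [])
      = ((PySem.List.pyRange mn (mx + 1) 1).map (pvPf word),
         (PySem.List.pyRange mn (mx + 1) 1).map (pvSf word)) := by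
  have h1 := pvFoldl_pair (PySem.List.pyRange mn (mx + 1) 1)
    (fun acc j => acc ++ [String.ofList (PySem.List.slice word none (some j))])
    (fun acc j => acc ++ [String.ofList (PySem.List.slice word (some (-j)) none)])
    ([] : List String) ([] : List String)
  refine h1.trans ?_
  rw [pvFoldl_append_map, pvFoldl_append_map]
  rfl

-- a token of split has no separator char
theorem pvMsp_mem_not_mem (c : Char) (l : List Char) : ∀ t ∈ pvMsp c l, c ∉ t := by
  induction l with
  | nil => intro t ht; simp [pvMsp] at ht; simp [ht]
  | cons a l ih =>
    intro t ht
    simp only [pvMsp] at ht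
    by_cases hac : a = c
    · rw [if_pos hac] at ht
      rcases List.mem_cons.mp ht with rfl | ht
      · simp
      · exact ih t ht
    · rw [if_neg hac] at ht
      have hne := pvMsp_ne_nil c l
      cases hmsp : pvMsp c l with
      | nil => exact absurd hmsp hne
      | cons u us =>
        rw [hmsp] at ht
        rcases List.mem_cons.mp ht with rfl | ht
        · intro hc
          rcases List.mem_cons.mp hc with rfl | hc
          · exact hac rfl
          · exact ih u (by simp [hmsp]) hc
        · exact ih t (by simp [hmsp, ht])

theorem pvMsp_of_not_mem (c : Char) (l : List Char) (h : c ∉ l) : pvMsp c l = [l] := by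
  induction l with
  | nil => rfl
  | cons a l ih =>
    simp only [List.mem_cons, not_or] at h
    simp only [pvMsp, ih h.2]
    rw [if_neg (fun he => h.1 he.symm)]

-- A's value on a separator-free token: the two Counters of the mapped lists
theorem pvGpsA_single (t : List Char) (mn mx : Int) (h : ' ' ∉ t) :
    pvGpsA t mn mx
      = (pvUpdList PySem.Dict.empty ((PySem.List.pyRange mn (mx + 1) 1).map (pvPf (PySem.Chars.lower t))),
         pvUpdList PySem.Dict.empty ((PySem.List.pyRange mn (mx + 1) 1).map (pvSf (PySem.Chars.lower t)))) := by
  rw [pvGpsA]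
  have hsplit : PySem.Chars.splitOn t [' '] = [t] := by
    rw [pvSplitOn_eq_msp, pvMsp_of_not_mem ' ' t h]
  rw [hsplit]
  simp only [List.length_cons, List.length_nil, List.headD_cons]
  rw [pvLists_eq]
  simp

-- invariant: both accumulated dicts have nodup keys
def pvNodupPair (d : PySem.Dict String Int × PySem.Dict String Int) : Prop :=
  d.1.keys.Nodup ∧ d.2.keys.Nodup

-- Counter(L) itself is the pvUpdList fold from the empty dict (definitional)
theorem pvUpdCounter_counter' (L : List String) (d : PySem.Dict String Int)
    (hd : d.keys.Nodup) : pvUpdCounter d (pvUpdList PySem.Dict.empty L).items = pvUpdList d L := by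
  have : pvUpdList PySem.Dict.empty L = PySem.Dict.counter L := by
    rw [PySem.Dict.counter_eq_foldl]; rfl
  rw [this]
  exact pvUpdCounter_counter L d hd

theorem pvNodup_updList (d : PySem.Dict String Int) (L : List String)
    (hd : d.keys.Nodup) : (pvUpdList d L).keys.Nodup := by
  have hk : (pvUpdList d L).keys = PySem.Set.update d.keys L :=
    PySem.Dict.keys_foldl_modify L 0 (fun _ _ => fun v => v + 1) d
  rw [hk]
  exact PySem.Set.nodup_update _ _ hd

theorem pvMain (s : List Char) (mn mx : Int) : pvGpsA s mn mx = pvGpsB s mn mx := by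
  unfold pvGpsB
  rw [pvGpsA]
  by_cases h : (PySem.Chars.splitOn s [' ']).length = 1
  · rw [dif_pos h]
    obtain ⟨t, ht⟩ : ∃ t, PySem.Chars.splitOn s [' '] = [t] := by
      cases hs : PySem.Chars.splitOn s [' '] with
      | nil => rw [hs] at h; simp at h
      | cons u us =>
        rw [hs] at h
        simp at h
        exact ⟨u, by simp [h]⟩
    rw [ht]
    simp only [List.headD_cons, List.foldl_cons, List.foldl_nil]
    rw [pvLists_eq, pvInner_eq]
  · rw [dif_neg h]
    have hattach :
        (PySem.Chars.splitOn s [' ']).attach.foldl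
          (fun (acc : PySem.Dict String Int × PySem.Dict String Int) t =>
            (pvUpdCounter acc.1 (pvGpsA t.1 mn mx).1.items,
             pvUpdCounter acc.2 (pvGpsA t.1 mn mx).2.items))
          (PySem.Dict.empty, PySem.Dict.empty)
        = (PySem.Chars.splitOn s [' ']).foldl
          (fun acc t =>
            (pvUpdCounter acc.1 (pvGpsA t mn mx).1.items,
             pvUpdCounter acc.2 (pvGpsA t mn mx).2.items))
          (PySem.Dict.empty, PySem.Dict.empty) :=
      List.foldl_attach (f := fun acc t =>
        (pvUpdCounter acc.1 (pvGpsA t mn mx).1.items,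
         pvUpdCounter acc.2 (pvGpsA t mn mx).2.items))
    refine Eq.trans hattach ?_
    apply pvFoldl_congr_of_inv _ _ _ _ pvNodupPair
    · exact ⟨PySem.Dict.nodup_keys_empty, PySem.Dict.nodup_keys_empty⟩
    · intro acc t htmem hacc
      have hnosp : ' ' ∉ t := by
        rw [pvSplitOn_eq_msp] at htmem
        exact pvMsp_mem_not_mem ' ' s t htmem
      rw [pvGpsA_single t mn mx hnosp]
      simp only
      rw [pvUpdCounter_counter' _ _ hacc.1, pvUpdCounter_counter' _ _ hacc.2, pvInner_eq]
    · intro acc t htmem hacc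
      rw [pvInner_eq]
      constructor
      · exact pvNodup_updList _ _ hacc.1
      · exact pvNodup_updList _ _ hacc.2

-- ===== VERDICT (by name: the statement is the Claim_ definition above) =====
theorem getPrefixesAndSuffixes_spec : Claim_equal_getPrefixesAndSuffixes := by
  intro target mn mx _
  unfold Spec_getPrefixesAndSuffixes getPrefixesAndSuffixes getPrefixesAndSuffixes_alt
  rw [pvMain]
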